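-- pv_equiv track=rewrite | github.com/happidaswork-netizen/d2ilite | scraper/run_public_scraper.py | _order_metadata_rows_by_retry_priority
-- ===== SOURCE A (Python) =====
-- from typing import Any, Dict, Iterable, List, Optional, Tuple
--
-- def _order_metadata_rows_by_retry_priority(
--     rows: List[Dict[str, Any]],
--     latest_status: Dict[str, str],
--     retry_failed_first: bool,
-- ) -> Tuple[List[Dict[str, Any]], Dict[str, int]]:
--     if not retry_failed_first:
--         return list(rows), {"failed_rows": 0, "pending_rows": len(rows), "ok_rows": 0}
--
--     failed_rows: List[Dict[str, Any]] = []
--     pending_rows: List[Dict[str, Any]] = []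
--     ok_rows: List[Dict[str, Any]] = []
--     for row in rows:
--         detail_url = str(row.get("detail_url", "")).strip()
--         status = str(latest_status.get(detail_url, "")).strip().lower() if detail_url else ""
--         if status == "ok":
--             ok_rows.append(row)
--         elif status:
--             failed_rows.append(row)
--         else:
--             pending_rows.append(row)
--
--     ordered_rows = failed_rows + pending_rows + ok_rows
--     return ordered_rows, {
--         "failed_rows": len(failed_rows),
--         "pending_rows": len(pending_rows),
--         "ok_rows": len(ok_rows),
--     }
-- ===== SOURCE B (Python) =====
-- def _order_metadata_rows_by_retry_priority(rows, latest_status, retry_failed_first):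
--     if not retry_failed_first:
--         return list(rows), {"failed_rows": 0, "pending_rows": len(rows), "ok_rows": 0}
--
--     def priority(row):
--         detail_url = str(row.get("detail_url", "")).strip()
--         status = str(latest_status.get(detail_url, "")).strip().lower() if detail_url else ""
--         if status == "ok":
--             return 2
--         if status:
--             return 0
--         return 1
--
--     pris = [priority(row) for row in rows]
--     ordered = [row for _, row in sorted(zip(pris, rows), key=lambda pr: pr[0])]
--     return ordered, {
--         "failed_rows": pris.count(0),
--         "pending_rows": pris.count(1),
--         "ok_rows": pris.count(2),
--     }
-- ===== Notes on version B (the rewrite author's own statement) =====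
-- stated objective: alternative
-- what changed: Replaces the three-accumulator classification loop by computing a per-row priority (failed=0, pending=1, ok=2) once, stable-sorting the rows by that key, and counting priorities for the stats dict.
import Mathlib
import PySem

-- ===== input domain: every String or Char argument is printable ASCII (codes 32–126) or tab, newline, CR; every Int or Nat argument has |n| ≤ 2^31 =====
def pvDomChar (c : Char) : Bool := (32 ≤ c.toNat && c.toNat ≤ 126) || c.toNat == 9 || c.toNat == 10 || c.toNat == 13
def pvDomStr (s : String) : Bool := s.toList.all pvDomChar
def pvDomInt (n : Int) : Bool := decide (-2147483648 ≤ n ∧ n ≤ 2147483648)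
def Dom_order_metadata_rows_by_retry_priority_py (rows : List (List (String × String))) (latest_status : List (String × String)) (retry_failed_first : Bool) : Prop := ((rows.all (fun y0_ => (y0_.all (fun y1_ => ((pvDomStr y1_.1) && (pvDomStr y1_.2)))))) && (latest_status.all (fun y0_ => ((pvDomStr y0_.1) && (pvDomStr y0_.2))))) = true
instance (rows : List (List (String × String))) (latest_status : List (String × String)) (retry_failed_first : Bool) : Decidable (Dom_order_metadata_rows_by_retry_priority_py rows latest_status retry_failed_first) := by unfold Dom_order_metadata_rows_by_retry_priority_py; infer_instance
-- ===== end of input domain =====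

-- B re-implements the three-bucket partition as a stable sort of the rows by a derived
-- priority key (failed=0, pending=1, ok=2) plus a count of the priorities; same values, no speed claim.

-- ===== PORT A =====
-- shared status derivation (row.get("detail_url","").strip(); latest_status lookup, strip, lower)
def pvStatus (latest_status : List (String × String)) (row : List (String × String)) : String :=
  let detail_url := PySem.Str.strip ((PySem.Dict.mk row).getD "detail_url" "")
  if detail_url ≠ "" then PySem.Str.lower (PySem.Str.strip ((PySem.Dict.mk latest_status).getD detail_url "")) else ""

-- the body of A's for-loop: append the row to the ok / failed / pending accumulator
def pvStepA (latest_status : List (String × String))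
    (acc : List (List (String × String)) × List (List (String × String)) × List (List (String × String)))
    (row : List (String × String)) :
    List (List (String × String)) × List (List (String × String)) × List (List (String × String)) :=
  let status := pvStatus latest_status row
  if status = "ok" then (acc.1, acc.2.1, acc.2.2 ++ [row])
  else if status ≠ "" then (acc.1 ++ [row], acc.2.1, acc.2.2)
  else (acc.1, acc.2.1 ++ [row], acc.2.2)

def order_metadata_rows_by_retry_priority_py (rows : List (List (String × String))) (latest_status : List (String × String)) (retry_failed_first : Bool) : (List (List (String × String))) × (List (String × Int)) :=
  if retry_failed_first = false then
    (rows, [("failed_rows", (0 : Int)), ("pending_rows", (rows.length : Int)), ("ok_rows", (0 : Int))])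
  else
    match rows.foldl (pvStepA latest_status) ([], [], []) with
    | (failed_rows, pending_rows, ok_rows) =>
      (failed_rows ++ pending_rows ++ ok_rows,
       [("failed_rows", (failed_rows.length : Int)),
        ("pending_rows", (pending_rows.length : Int)),
        ("ok_rows", (ok_rows.length : Int))])

-- ===== PORT B =====
-- priority: ok→2, other non-empty status→0, empty→1
def pvPriority (latest_status : List (String × String)) (row : List (String × String)) : Int :=
  let status := pvStatus latest_status row
  if status = "ok" then 2 else if status ≠ "" then 0 else 1

def order_metadata_rows_by_retry_priority_py_alt (rows : List (List (String × String))) (latest_status : List (String × String)) (retry_failed_first : Bool) : (List (List (String × String))) × (List (String × Int)) :=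
  if retry_failed_first = false then
    (rows, [("failed_rows", (0 : Int)), ("pending_rows", (rows.length : Int)), ("ok_rows", (0 : Int))])
  else
    let pris := rows.map (pvPriority latest_status)
    ((PySem.List.sorted (pris.zip rows) (fun q => q.1) false).map Prod.snd,
     [("failed_rows", ((pris.count 0 : Nat) : Int)),
      ("pending_rows", ((pris.count 1 : Nat) : Int)),
      ("ok_rows", ((pris.count 2 : Nat) : Int))])

-- ===== PRECONDITION & SPEC =====
def Spec_order_metadata_rows_by_retry_priority_py (rows : List (List (String × String))) (latest_status : List (String × String)) (retry_failed_first : Bool) (out : (List (List (String × String))) × (List (String × Int))) : Prop := out = order_metadata_rows_by_retry_priority_py_alt rows latest_status retry_failed_first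
instance (rows : List (List (String × String))) (latest_status : List (String × String)) (retry_failed_first : Bool) (out : (List (List (String × String))) × (List (String × Int))) : Decidable (Spec_order_metadata_rows_by_retry_priority_py rows latest_status retry_failed_first out) := by unfold Spec_order_metadata_rows_by_retry_priority_py; infer_instance

-- ===== CLAIM (what is proved, stated in full; the proofs are below) =====
def Claim_equal_order_metadata_rows_by_retry_priority_py : Prop := ∀ (rows : List (List (String × String))) (latest_status : List (String × String)) (retry_failed_first : Bool), Dom_order_metadata_rows_by_retry_priority_py rows latest_status retry_failed_first → Spec_order_metadata_rows_by_retry_priority_py rows latest_status retry_failed_first (order_metadata_rows_by_retry_priority_py rows latest_status retry_failed_first)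

-- ===== LEMMAS AND PROOFS =====

theorem pvPriority_cases (ls : List (String × String)) (r : List (String × String)) :
    pvPriority ls r = 0 ∨ pvPriority ls r = 1 ∨ pvPriority ls r = 2 := by
  simp only [pvPriority]
  split_ifs <;> simp

theorem insertBy_append_left {α : Type} (b : α → α → Bool) (x : α) (ys zs : List α)
    (h : ∀ y ∈ ys, b x y = false) :
    PySem.List.insertBy b x (ys ++ zs) = ys ++ PySem.List.insertBy b x zs := by
  induction ys with
  | nil => simp
  | cons y t ih =>
    have hy : b x y = false := h y (by simp)
    simp [PySem.List.insertBy, hy, ih (fun z hz => h z (by simp [hz]))]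

theorem insertBy_eq_cons {α : Type} (b : α → α → Bool) (x : α) (zs : List α)
    (h : ∀ y ∈ zs, b x y = true) :
    PySem.List.insertBy b x zs = x :: zs := by
  cases zs with
  | nil => simp [PySem.List.insertBy]
  | cons y t => simp [PySem.List.insertBy, h y (by simp)]

theorem sorted_group_aux {α : Type} (l : List (Int × α))
    (h : ∀ q ∈ l, q.1 = 0 ∨ q.1 = 1 ∨ q.1 = 2) :
    ∀ (f p o : List (Int × α)),
      (∀ q ∈ f, q.1 = 0) → (∀ q ∈ p, q.1 = 1) → (∀ q ∈ o, q.1 = 2) →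
      l.foldl (fun acc x => PySem.List.insertBy (fun a b => decide (a.1 < b.1)) x acc) (f ++ p ++ o)
        = (f ++ l.filter (fun q => decide (q.1 = 0))) ++ (p ++ l.filter (fun q => decide (q.1 = 1)))
            ++ (o ++ l.filter (fun q => decide (q.1 = 2))) := by
  induction l with
  | nil => intro f p o _ _ _; simp
  | cons x t ih =>
    intro f p o hf hp ho
    have hx := h x (by simp)
    have ht : ∀ q ∈ t, q.1 = 0 ∨ q.1 = 1 ∨ q.1 = 2 := fun q hq => h q (by simp [hq])
    rcases hx with hx | hx | hx
    · -- x goes to the end of the failed group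
      have step : PySem.List.insertBy (fun a b => decide ((a : Int × α).1 < b.1)) x (f ++ p ++ o)
          = (f ++ [x]) ++ p ++ o := by
        rw [List.append_assoc,
            insertBy_append_left _ x f (p ++ o)
              (by intro y hy; simp [hf y hy, hx]),
            insertBy_eq_cons _ x (p ++ o)
              (by intro y hy; rcases List.mem_append.1 hy with hy | hy
                  · simp [hp y hy, hx]
                  · simp [ho y hy, hx])]
        simp
      rw [List.foldl_cons, step, ih ht (f ++ [x]) p o
            (by intro q hq; rcases List.mem_append.1 hq with hq | hq
                · exact hf q hq
                · simp at hq; simp [hq, hx]) hp ho]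
      simp [List.filter_cons, hx]
    · -- x goes to the end of the pending group
      have step : PySem.List.insertBy (fun a b => decide ((a : Int × α).1 < b.1)) x (f ++ p ++ o)
          = f ++ (p ++ [x]) ++ o := by
        rw [insertBy_append_left _ x (f ++ p) o
              (by intro y hy; rcases List.mem_append.1 hy with hy | hy
                  · simp [hf y hy, hx]
                  · simp [hp y hy, hx]),
            insertBy_eq_cons _ x o (by intro y hy; simp [ho y hy, hx])]
        simp
      rw [List.foldl_cons, step, ih ht f (p ++ [x]) o hf
            (by intro q hq; rcases List.mem_append.1 hq with hq | hq
                · exact hp q hq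
                · simp at hq; simp [hq, hx]) ho]
      simp [List.filter_cons, hx]
    · -- x goes to the very end
      have step : PySem.List.insertBy (fun a b => decide ((a : Int × α).1 < b.1)) x (f ++ p ++ o)
          = f ++ p ++ (o ++ [x]) := by
        rw [PySem.List.insertBy_of_forall_not_before _ x (f ++ p ++ o)
              (by intro y hy
                  rcases List.mem_append.1 hy with hy | hy
                  · rcases List.mem_append.1 hy with hy | hy
                    · simp [hf y hy, hx]
                    · simp [hp y hy, hx]
                  · simp [ho y hy, hx])]
        simp
      rw [List.foldl_cons, step, ih ht f p (o ++ [x]) hf hp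
            (by intro q hq; rcases List.mem_append.1 hq with hq | hq
                · exact ho q hq
                · simp at hq; simp [hq, hx])]
      simp [List.filter_cons, hx]

theorem sorted_group {α : Type} (l : List (Int × α))
    (h : ∀ q ∈ l, q.1 = 0 ∨ q.1 = 1 ∨ q.1 = 2) :
    PySem.List.sorted l (fun q => q.1) false
      = l.filter (fun q => decide (q.1 = 0)) ++ l.filter (fun q => decide (q.1 = 1))
          ++ l.filter (fun q => decide (q.1 = 2)) := by
  rw [PySem.List.sorted_eq_foldl_insertBy]
  have := sorted_group_aux l h [] [] [] (by simp) (by simp) (by simp)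
  simpa using this

theorem zip_filter_snd {α : Type} (f : α → Int) (rows : List α) (v : Int) :
    (((rows.map f).zip rows).filter (fun q => decide (q.1 = v))).map Prod.snd
      = rows.filter (fun r => decide (f r = v)) := by
  induction rows with
  | nil => simp
  | cons r t ih =>
    by_cases hv : f r = v <;> simp [List.filter_cons, hv, ih]

theorem count_map_filter {α : Type} (f : α → Int) (l : List α) (v : Int) :
    (l.map f).count v = (l.filter (fun r => decide (f r = v))).length := by
  induction l with
  | nil => simp
  | cons r t ih =>
    by_cases hv : f r = v
    · simp [List.count_cons, List.filter_cons, hv, ih]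
    · have hv' : ¬ v = f r := fun h => hv h.symm
      simp [List.count_cons, List.filter_cons, hv, hv', ih]

theorem foldA_filter (ls : List (String × String)) (rows : List (List (String × String))) :
    ∀ (f p o : List (List (String × String))),
      rows.foldl (pvStepA ls) (f, p, o)
        = (f ++ rows.filter (fun r => decide (pvPriority ls r = 0)),
           p ++ rows.filter (fun r => decide (pvPriority ls r = 1)),
           o ++ rows.filter (fun r => decide (pvPriority ls r = 2))) := by
  induction rows with
  | nil => intro f p o; simp
  | cons r t ih =>
    intro f p o
    rw [List.foldl_cons]
    by_cases hok : pvStatus ls r = "ok"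
    · have hpri : pvPriority ls r = 2 := by simp [pvPriority, hok]
      simp [pvStepA, hok, hpri, ih, List.filter_cons]
    · by_cases hne : pvStatus ls r = ""
      · have hpri : pvPriority ls r = 1 := by simp [pvPriority, hok, hne]
        simp [pvStepA, hok, hne, hpri, ih, List.filter_cons]
      · have hpri : pvPriority ls r = 0 := by simp [pvPriority, hok, hne]
        simp [pvStepA, hok, hne, hpri, ih, List.filter_cons]

-- ===== VERDICT (by name: the statement is the Claim_ definition above) =====
theorem order_metadata_rows_by_retry_priority_py_spec : Claim_equal_order_metadata_rows_by_retry_priority_py := by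
  intro rows ls b _
  unfold Spec_order_metadata_rows_by_retry_priority_py
  cases b with
  | false =>
    simp [order_metadata_rows_by_retry_priority_py, order_metadata_rows_by_retry_priority_py_alt]
  | true =>
    have hz : ∀ q ∈ (rows.map (pvPriority ls)).zip rows, q.1 = 0 ∨ q.1 = 1 ∨ q.1 = 2 := by
      intro q hq
      obtain ⟨h1, _⟩ := List.of_mem_zip hq
      obtain ⟨r, _, he⟩ := List.mem_map.1 h1
      rw [← he]
      exact pvPriority_cases ls r
    simp only [order_metadata_rows_by_retry_priority_py, order_metadata_rows_by_retry_priority_py_alt,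
      Bool.true_eq_false, if_false, foldA_filter, sorted_group _ hz]
    simp [zip_filter_snd, count_map_filter]
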